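-- pv_equiv track=rewrite | github.com/christiangeronimo/CP125-Class-Repo | labs/lab05/exercise3/exercise3.py | find_bottleneck_index
-- ===== SOURCE A (Python) =====
-- def find_bottleneck_index(traceroute):
--     """
--     Find the index of the hop where the largest latency jump begins.
--     """
--     max_jump = 0
--     bottleneck_index = 0
--
--     for i in range(1, len(traceroute)):
--         prev_latency = traceroute[i - 1][1]
--         curr_latency = traceroute[i][1]
--
--         jump = abs(curr_latency - prev_latency)
--
--         if jump > max_jump:
--             max_jump = jump
--             bottleneck_index = i - 1
--
--     return bottleneck_index
-- ===== SOURCE B (Python) =====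
-- def find_bottleneck_index(traceroute):
--     if len(traceroute) < 2:
--         return 0
--     jumps = [abs(b[1] - a[1]) for a, b in zip(traceroute, traceroute[1:])]
--     return jumps.index(max(jumps))
-- ===== Notes on version B (the rewrite author's own statement) =====
-- stated objective: idiomatic
-- what changed: Replaces the fused running-max index loop with two shaped passes: build the jumps table by zipping adjacent pairs, then recover the first argmax with max() plus list.index().
import Mathlib
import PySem

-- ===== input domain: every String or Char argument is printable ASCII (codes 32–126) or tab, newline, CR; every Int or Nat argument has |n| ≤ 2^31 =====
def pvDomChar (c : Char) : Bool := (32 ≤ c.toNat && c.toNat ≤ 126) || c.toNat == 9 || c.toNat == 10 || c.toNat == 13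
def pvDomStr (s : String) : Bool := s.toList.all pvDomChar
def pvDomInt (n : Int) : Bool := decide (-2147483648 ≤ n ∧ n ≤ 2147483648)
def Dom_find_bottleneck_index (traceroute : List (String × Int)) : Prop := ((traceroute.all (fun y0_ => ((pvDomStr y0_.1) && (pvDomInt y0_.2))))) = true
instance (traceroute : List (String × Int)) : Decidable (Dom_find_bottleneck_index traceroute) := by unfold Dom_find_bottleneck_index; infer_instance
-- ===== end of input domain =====

-- ===== PORT A =====
-- Literal port of A: for i in range(1, len(traceroute)) with a running (max_jump, bottleneck_index) pair.
def find_bottleneck_index (traceroute : List (String × Int)) : Int :=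
  ((PySem.List.pyRange 1 (traceroute.length : Int) 1).foldl
    (fun (s : Int × Int) (i : Int) =>
      let prev_latency : Int := (PySem.List.pyGetD traceroute (i - 1) ("", 0)).2
      let curr_latency : Int := (PySem.List.pyGetD traceroute i ("", 0)).2
      let jump : Int := |curr_latency - prev_latency|
      if jump > s.1 then (jump, i - 1) else s)
    ((0 : Int), (0 : Int))).2

-- ===== PORT B =====
-- Port of B: guard, build the jumps table from zipped adjacent pairs, then index-of-max.
-- (.getD totalises max/index; under the guard jumps is nonempty so both always hit 'some'.)
def find_bottleneck_index_alt (traceroute : List (String × Int)) : Int :=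
  if (traceroute.length : Int) < 2 then (0 : Int)
  else
    let jumps : List Int := (traceroute.zip traceroute.tail).map (fun p => |p.2.2 - p.1.2|)
    let m : Int := (PySem.List.max? jumps (fun x : Int => x)).getD 0
    Int.ofNat ((PySem.List.index? jumps m).getD 0)

-- ===== PRECONDITION & SPEC =====
def Spec_find_bottleneck_index (traceroute : List (String × Int)) (out : Int) : Prop := out = find_bottleneck_index_alt traceroute
instance (traceroute : List (String × Int)) (out : Int) : Decidable (Spec_find_bottleneck_index traceroute out) := by unfold Spec_find_bottleneck_index; infer_instance

-- ===== CLAIM (what is proved, stated in full; the proofs are below) =====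
def Claim_equal_find_bottleneck_index : Prop := ∀ (traceroute : List (String × Int)), Dom_find_bottleneck_index traceroute → Spec_find_bottleneck_index traceroute (find_bottleneck_index traceroute)

-- ===== LEMMAS AND PROOFS =====

-- A's loop body as structural recursion over the jump list, with an explicit index counter k.
def pvAux : List Int → Int × Int → Int → Int × Int
  | [], s, _ => s
  | x :: xs, s, k => pvAux xs (if x > s.1 then (x, k) else s) (k + 1)

-- first index of v in js (meaningful when v ∈ js)
def pvFidx : List Int → Int → Nat
  | [], _ => 0
  | x :: xs, v => if x = v then 0 else pvFidx xs v + 1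

theorem pv_le_foldl_max (js : List Int) : ∀ a : Int, a ≤ js.foldl max a := by
  induction js with
  | nil => intro a; simp
  | cons x xs ih =>
    intro a
    calc a ≤ max a x := le_max_left a x
    _ ≤ xs.foldl max (max a x) := ih (max a x)
    _ = (x :: xs).foldl max a := by simp [List.foldl_cons]

theorem pv_index?_eq (js : List Int) (v : Int) (h : v ∈ js) :
    PySem.List.index? js v = some (pvFidx js v) := by
  induction js with
  | nil => simp at h
  | cons x xs ih =>
    by_cases hx : x = v
    · subst hx; rw [PySem.List.index?_cons_self]; simp [pvFidx]
    · have hv : v ∈ xs := by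
        rcases List.mem_cons.mp h with h1 | h1
        · exact absurd h1.symm hx
        · exact h1
      rw [PySem.List.index?_cons_of_ne xs hx, ih hv]
      simp [pvFidx, hx]

theorem pvAux_snd (js : List Int) : ∀ (mj bi k : Int),
    (pvAux js (mj, bi) k).2 =
      if js.foldl max mj = mj then bi
      else k + ((pvFidx js (js.foldl max mj) : Nat) : Int) := by
  induction js with
  | nil => intro mj bi k; simp [pvAux]
  | cons x xs ih =>
    intro mj bi k
    simp only [pvAux, List.foldl_cons]
    by_cases hx : x > mj
    · rw [if_pos hx]
      have hmax : max mj x = x := max_eq_right hx.le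
      rw [hmax, ih x k (k + 1)]
      have hge : x ≤ xs.foldl max x := pv_le_foldl_max xs x
      have hne : ¬ (xs.foldl max x = mj) := by omega
      rw [if_neg hne]
      by_cases hxm : xs.foldl max x = x
      · rw [if_pos hxm]
        have h0 : pvFidx (x :: xs) (xs.foldl max x) = 0 := by
          simp [pvFidx, hxm]
        rw [h0]; simp
      · rw [if_neg hxm]
        have hxne : ¬ (x = xs.foldl max x) := fun h => hxm h.symm
        have h1 : pvFidx (x :: xs) (xs.foldl max x) = pvFidx xs (xs.foldl max x) + 1 := by
          simp [pvFidx, hxne]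
        rw [h1]; push_cast; ring
    · rw [if_neg hx]
      have hmax : max mj x = mj := max_eq_left (by omega)
      rw [hmax, ih mj bi (k + 1)]
      by_cases hm : xs.foldl max mj = mj
      · simp [hm]
      · rw [if_neg hm, if_neg hm]
        have hge : mj ≤ xs.foldl max mj := pv_le_foldl_max xs mj
        have hxne : ¬ (x = xs.foldl max mj) := by omega
        have h1 : pvFidx (x :: xs) (xs.foldl max mj) = pvFidx xs (xs.foldl max mj) + 1 := by
          simp [pvFidx, hxne]
        rw [h1]; push_cast; ring

theorem pv_bridge (g : Int → Int) : ∀ (m : Nat) (a : Int) (s : Int × Int),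
    (PySem.List.pyRange a (a + (m : Int)) 1).foldl
      (fun (s : Int × Int) (i : Int) => if g i > s.1 then (g i, i - 1) else s) s
    = pvAux ((List.range m).map (fun (k : Nat) => g (a + (k : Int)))) s (a - 1) := by
  intro m
  induction m with
  | zero =>
    intro a s
    rw [show a + ((0 : Nat) : Int) = a by simp]
    rw [PySem.List.pyRange_one_eq_nil le_rfl]
    simp [pvAux]
  | succ n ih =>
    intro a s
    have h1 : a < a + ((n + 1 : Nat) : Int) := by push_cast; omega
    rw [PySem.List.pyRange_one_cons h1, List.foldl_cons]
    have h2 : a + ((n + 1 : Nat) : Int) = (a + 1) + (n : Int) := by push_cast; ring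
    rw [h2, ih (a + 1)]
    simp only [List.range_succ_eq_map, List.map_cons, List.map_map, pvAux,
      Nat.cast_zero, add_zero]
    have hfun : ((fun (k : Nat) => g (a + (k : Int))) ∘ Nat.succ) = (fun (k : Nat) => g ((a + 1) + (k : Int))) := by
      funext k
      simp only [Function.comp_apply]
      congr 1
      omega
    rw [hfun, show a + 1 - 1 = a by ring, show a - 1 + 1 = a by ring]

theorem pv_js_eq (tr : List (String × Int)) :
    (List.range (tr.length - 1)).map
      (fun (k : Nat) => |(PySem.List.pyGetD tr ((1 : Int) + (k : Int)) ("", 0)).2 -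
                 (PySem.List.pyGetD tr ((1 : Int) + (k : Int) - 1) ("", 0)).2|)
    = (tr.zip tr.tail).map (fun p => |p.2.2 - p.1.2|) := by
  apply List.ext_getElem
  · simp [List.length_zip]
  · intro k h1 h2
    have hk : k < tr.length - 1 := by simpa using h1
    have hk1 : k + 1 < tr.length := by omega
    have hk0 : k < tr.length := by omega
    simp only [List.getElem_map, List.getElem_zip, List.getElem_tail, List.getElem_range]
    rw [show (1 : Int) + ((k : Nat) : Int) = ((k + 1 : Nat) : Int) by push_cast; ring]
    rw [show ((k + 1 : Nat) : Int) - 1 = ((k : Nat) : Int) by push_cast; ring]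
    rw [PySem.List.pyGetD_natCast, PySem.List.pyGetD_natCast]
    rw [List.getD_eq_getElem _ _ hk1, List.getD_eq_getElem _ _ hk0]

theorem pv_main (tr : List (String × Int)) :
    find_bottleneck_index tr = find_bottleneck_index_alt tr := by
  by_cases hlen : tr.length < 2
  · unfold find_bottleneck_index find_bottleneck_index_alt
    rw [PySem.List.pyRange_one_eq_nil (by exact_mod_cast Nat.le_of_lt_succ hlen)]
    rw [if_pos (by exact_mod_cast hlen)]
    simp
  · have hn : 2 ≤ tr.length := not_lt.mp hlen
    unfold find_bottleneck_index find_bottleneck_index_alt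
    rw [if_neg (by omega)]
    show _ = Int.ofNat ((PySem.List.index?
        ((tr.zip tr.tail).map (fun p => |p.2.2 - p.1.2|))
        ((PySem.List.max? ((tr.zip tr.tail).map (fun p => |p.2.2 - p.1.2|))
          (fun x : Int => x)).getD 0)).getD 0)
    have hsplit : (tr.length : Int) = 1 + ((tr.length - 1 : Nat) : Int) := by omega
    rw [hsplit]
    rw [pv_bridge (fun i : Int => |(PySem.List.pyGetD tr i ("", 0)).2 -
          (PySem.List.pyGetD tr (i - 1) ("", 0)).2|) (tr.length - 1) 1 ((0 : Int), (0 : Int))]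
    rw [show (1 : Int) - 1 = 0 by ring]
    simp only [pv_js_eq]
    have hnonneg : ∀ y ∈ (tr.zip tr.tail).map (fun p => |p.2.2 - p.1.2|), (0 : Int) ≤ y := by
      intro y hy
      rcases List.mem_map.mp hy with ⟨p, _, rfl⟩
      exact abs_nonneg _
    have hlength : ((tr.zip tr.tail).map (fun p => |p.2.2 - p.1.2|)).length = tr.length - 1 := by
      simp [List.length_zip]
    obtain ⟨x, rest, hxr⟩ : ∃ x rest, (tr.zip tr.tail).map (fun p => |p.2.2 - p.1.2|) = x :: rest := by
      cases h : (tr.zip tr.tail).map (fun p => |p.2.2 - p.1.2|) with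
      | nil => rw [h] at hlength; simp at hlength; omega
      | cons x rest => exact ⟨x, rest, rfl⟩
    rw [hxr]
    rw [pvAux_snd (x :: rest) 0 0 0]
    rw [PySem.List.max?_id_cons]
    simp only [Option.getD_some]
    have hx0 : (0 : Int) ≤ x := hnonneg x (by rw [hxr]; simp)
    have hfold : (x :: rest).foldl max 0 = rest.foldl max x := by
      simp [List.foldl_cons, max_eq_right hx0]
    rw [hfold]
    have hmem : rest.foldl max x ∈ (x :: rest) :=
      PySem.List.max?_mem (PySem.List.max?_id_cons x rest)
    rw [pv_index?_eq (x :: rest) (rest.foldl max x) hmem]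
    simp only [Option.getD_some]
    have hxle : x ≤ rest.foldl max x := pv_le_foldl_max rest x
    by_cases hz : rest.foldl max x = 0
    · rw [if_pos hz]
      have hx : x = 0 := by omega
      rw [hz, hx]
      simp [pvFidx]
    · rw [if_neg hz]
      simp

-- ===== VERDICT (by name: the statement is the Claim_ definition above) =====
theorem find_bottleneck_index_spec : Claim_equal_find_bottleneck_index := by
  intro tr _
  unfold Spec_find_bottleneck_index
  exact pv_main tr
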